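-- pv_equiv track=rewrite | github.com/woletee/1D_ARC | src/backend/genetic_algorithm.py | flipped
-- ===== SOURCE A (Python) =====
-- def flipped(input_array):
--     # Extract non-zero elements from input array
--     input_nonzero = [val for val in input_array if val != 0]
--
--     # Reverse the list of non-zero elements
--     flipped_nonzero = input_nonzero[::-1]
--
--     # Replace non-zero elements in the original input array with flipped values
--     flipped_output = input_array[:]  # Create a copy to avoid modifying the original array
--     j = 0  # Index for flipped_nonzero list
--     for i in range(len(flipped_output)):
--         if flipped_output[i] != 0:
--             flipped_output[i] = flipped_nonzero[j]
--             j += 1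
--
--     return flipped_output
-- ===== SOURCE B (Python) =====
-- def flipped(input_array):
--     out = list(input_array)
--     i, j = 0, len(out) - 1
--     while i < j:
--         if out[i] == 0:
--             i += 1
--         elif out[j] == 0:
--             j -= 1
--         else:
--             out[i], out[j] = out[j], out[i]
--             i += 1
--             j -= 1
--     return out
-- ===== Notes on version B (the rewrite author's own statement) =====
-- stated objective: idiomatic
-- what changed: Replaces the extract-reverse-scatter pipeline (auxiliary filtered list, reversed copy, second indexed pass writing back) with an in-place two-pointer inward swap on a single copy, each pointer skipping zeros independently.
import Mathlib
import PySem

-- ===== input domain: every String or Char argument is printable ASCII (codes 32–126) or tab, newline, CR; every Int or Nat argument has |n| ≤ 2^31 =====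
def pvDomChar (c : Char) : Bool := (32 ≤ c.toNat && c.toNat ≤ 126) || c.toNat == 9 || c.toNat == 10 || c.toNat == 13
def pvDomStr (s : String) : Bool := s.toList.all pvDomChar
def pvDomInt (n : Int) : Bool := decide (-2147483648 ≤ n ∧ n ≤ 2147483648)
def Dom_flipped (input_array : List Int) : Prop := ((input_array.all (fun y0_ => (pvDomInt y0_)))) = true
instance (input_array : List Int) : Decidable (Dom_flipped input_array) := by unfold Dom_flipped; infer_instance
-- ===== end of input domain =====

-- B replaces A's extract-reverse-scatter pipeline by an in-place two-pointer inward swap (idiomatic; same O(n) cost).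

-- ===== PORT A =====
-- A's 'for i in range(len(flipped_output))' write-back loop: each position is read before
-- it is written, so the loop reads the ORIGINAL values in order; j counts the nonzero
-- elements seen so far, and 0 ≤ j < len(flipped_nonzero) whenever the read happens, so a
-- plain getD is exact (Python's flipped_nonzero[j] never raises here).
def pvScatterA (nz : List Int) : List Int → Nat → List Int
  | [], _ => []
  | x :: xs, j => if x ≠ 0 then nz.getD j 0 :: pvScatterA nz xs (j + 1) else x :: pvScatterA nz xs j

def flipped (input_array : List Int) : List Int :=
  let input_nonzero := input_array.filter (fun val => val != 0)
  -- input_nonzero[::-1]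
  let flipped_nonzero := (PySem.List.slice? input_nonzero none none (-1)).getD []
  pvScatterA flipped_nonzero input_array 0

-- ===== PORT B =====
-- Source B's 'while i < j' two-pointer loop; i only grows and j only shrinks while
-- 0 ≤ i < j < len(out), so Nat indices with a plain getD are exact (no read can raise;
-- Python's parallel assignment reads out[i] and out[j] before either write, which the
-- two chained sets reproduce since both values are read from the unmodified 'out').
def pvLoopB (out : List Int) (i j : Nat) : List Int :=
  if i < j then
    if out.getD i 0 == 0 then pvLoopB out (i + 1) j
    else if out.getD j 0 == 0 then pvLoopB out i (j - 1)
    else pvLoopB ((out.set i (out.getD j 0)).set j (out.getD i 0)) (i + 1) (j - 1)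
  else out
termination_by j - i
decreasing_by all_goals omega

def flipped_alt (input_array : List Int) : List Int :=
  pvLoopB input_array 0 (input_array.length - 1)

-- ===== PRECONDITION & SPEC =====
def Spec_flipped (input_array : List Int) (out : List Int) : Prop := out = flipped_alt input_array
instance (input_array : List Int) (out : List Int) : Decidable (Spec_flipped input_array out) := by unfold Spec_flipped; infer_instance

-- ===== CLAIM (what is proved, stated in full; the proofs are below) =====
def Claim_equal_flipped : Prop := ∀ (input_array : List Int), Dom_flipped input_array → Spec_flipped input_array (flipped input_array)

-- ===== LEMMAS AND PROOFS =====

-- reference function both ports are reduced to: reverse the nonzero elements of a list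
-- keeping zeros in place, by peeling values off both ends
def pvMid : List Int → List Int
  | [] => []
  | x :: xs =>
    if hx : xs = [] then [x]
    else
      if x = 0 then 0 :: pvMid xs
      else if xs.getLast hx = 0 then pvMid (x :: xs.dropLast) ++ [0]
      else xs.getLast hx :: pvMid xs.dropLast ++ [x]
termination_by l => l.length
decreasing_by
  · simp
  · have hpos : 0 < xs.length := by
      cases xs with
      | nil => exact absurd rfl hx
      | cons a l => simp
    simp only [List.length_cons, List.length_dropLast]
    omega
  · have hpos : 0 < xs.length := by
      cases xs with
      | nil => exact absurd rfl hx
      | cons a l => simp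
    simp only [List.length_cons, List.length_dropLast]
    omega

lemma pvMid_nil : pvMid [] = [] := by rw [pvMid]

lemma pvMid_single (x : Int) : pvMid [x] = [x] := by rw [pvMid]; simp

lemma pvMid_cons (x : Int) (xs : List Int) (hx : xs ≠ []) :
    pvMid (x :: xs) =
      if x = 0 then 0 :: pvMid xs
      else if xs.getLast hx = 0 then pvMid (x :: xs.dropLast) ++ [0]
      else xs.getLast hx :: pvMid xs.dropLast ++ [x] := by
  conv_lhs => rw [pvMid]
  simp [hx]

-- number of nonzero elements
def pvCnt (xs : List Int) : Nat := (xs.filter (fun v => v != 0)).length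

lemma pvCnt_nil : pvCnt [] = 0 := rfl

lemma pvCnt_cons (x : Int) (xs : List Int) :
    pvCnt (x :: xs) = (if x = 0 then 0 else 1) + pvCnt xs := by
  by_cases hx : x = 0
  · simp [pvCnt, hx]
  · simp [pvCnt, hx]
    omega

lemma pvScatterA_append (nz xs ys : List Int) (j : Nat) :
    pvScatterA nz (xs ++ ys) j = pvScatterA nz xs j ++ pvScatterA nz ys (j + pvCnt xs) := by
  induction xs generalizing j with
  | nil => simp [pvScatterA, pvCnt_nil]
  | cons x xs ih =>
    by_cases hx : x = 0
    · subst hx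
      have hc : j + pvCnt ((0 : Int) :: xs) = j + pvCnt xs := by
        rw [pvCnt_cons, if_pos rfl]; omega
      rw [show ((0 : Int) :: xs) ++ ys = (0 : Int) :: (xs ++ ys) from rfl, hc]
      simp [pvScatterA, ih]
    · have hc : j + pvCnt (x :: xs) = j + 1 + pvCnt xs := by
        rw [pvCnt_cons, if_neg hx]; omega
      rw [show (x :: xs) ++ ys = x :: (xs ++ ys) from rfl, hc]
      simp [pvScatterA, hx, ih]

lemma pvScatterA_prefix (m t xs : List Int) (j : Nat) (h : j + pvCnt xs ≤ m.length) :
    pvScatterA (m ++ t) xs j = pvScatterA m xs j := by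
  induction xs generalizing j with
  | nil => simp [pvScatterA]
  | cons x xs ih =>
    rw [pvCnt_cons] at h
    by_cases hx : x = 0
    · simp [hx] at h
      simp [pvScatterA, hx, ih _ h]
    · simp [hx] at h
      have hj : j < m.length := by omega
      have h' : (j + 1) + pvCnt xs ≤ m.length := by omega
      simp [pvScatterA, hx, ih _ h', List.getElem?_append_left hj]

lemma pvScatterA_shift (v : Int) (m xs : List Int) (j : Nat) :
    pvScatterA (v :: m) xs (j + 1) = pvScatterA m xs j := by
  induction xs generalizing j with
  | nil => simp [pvScatterA]
  | cons x xs ih =>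
    by_cases hx : x = 0 <;> simp [pvScatterA, hx, ih]

lemma flipped_eq_scatter (xs : List Int) :
    flipped xs = pvScatterA (xs.filter (fun v => v != 0)).reverse xs 0 := by
  simp [flipped, PySem.List.slice?_none_none_neg_one]

lemma flipped_nil : flipped [] = [] := by
  rw [flipped_eq_scatter]; rfl

lemma flipped_single (x : Int) : flipped [x] = [x] := by
  rw [flipped_eq_scatter]
  by_cases hx : x = 0 <;> simp [pvScatterA, hx]

lemma flipped_cons_zero (xs : List Int) : flipped (0 :: xs) = 0 :: flipped xs := by
  rw [flipped_eq_scatter, flipped_eq_scatter]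
  simp [pvScatterA]

lemma flipped_append_zero (xs : List Int) : flipped (xs ++ [0]) = flipped xs ++ [0] := by
  rw [flipped_eq_scatter, flipped_eq_scatter]
  have hf : (xs ++ [0]).filter (fun v => v != 0) = xs.filter (fun v => v != 0) := by
    simp [List.filter_append]
  rw [hf, pvScatterA_append]
  simp [pvScatterA]

lemma flipped_sandwich (a b : Int) (ys : List Int) (ha : a ≠ 0) (hb : b ≠ 0) :
    flipped (a :: ys ++ [b]) = b :: flipped ys ++ [a] := by
  rw [flipped_eq_scatter, flipped_eq_scatter]
  have hfil : (a :: ys ++ [b]).filter (fun v => v != 0) =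
      a :: ys.filter (fun v => v != 0) ++ [b] := by
    simp [List.filter_append, ha, hb]
  rw [hfil]
  have hrev : (a :: ys.filter (fun v => v != 0) ++ [b]).reverse =
      b :: ((ys.filter (fun v => v != 0)).reverse ++ [a]) := by simp
  rw [hrev]
  rw [show (a :: ys ++ [b]) = a :: (ys ++ [b]) from by simp]
  rw [show pvScatterA (b :: ((ys.filter (fun v => v != 0)).reverse ++ [a])) (a :: (ys ++ [b])) 0 =
      if a ≠ 0 then (b :: ((ys.filter (fun v => v != 0)).reverse ++ [a])).getD 0 0 ::
        pvScatterA (b :: ((ys.filter (fun v => v != 0)).reverse ++ [a])) (ys ++ [b]) (0 + 1)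
      else a :: pvScatterA (b :: ((ys.filter (fun v => v != 0)).reverse ++ [a])) (ys ++ [b]) 0
    from rfl]
  rw [if_pos ha, pvScatterA_shift b ((ys.filter (fun v => v != 0)).reverse ++ [a]) (ys ++ [b]) 0]
  rw [pvScatterA_append]
  have h1 : pvScatterA ((ys.filter (fun v => v != 0)).reverse ++ [a]) ys 0 =
      pvScatterA (ys.filter (fun v => v != 0)).reverse ys 0 :=
    pvScatterA_prefix _ _ _ 0 (by simp [pvCnt])
  have h2 : pvScatterA ((ys.filter (fun v => v != 0)).reverse ++ [a]) [b] (0 + pvCnt ys) = [a] := by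
    rw [show pvScatterA ((ys.filter (fun v => v != 0)).reverse ++ [a]) [b] (0 + pvCnt ys) =
        if b ≠ 0 then ((ys.filter (fun v => v != 0)).reverse ++ [a]).getD (0 + pvCnt ys) 0 ::
          pvScatterA ((ys.filter (fun v => v != 0)).reverse ++ [a]) [] (0 + pvCnt ys + 1)
        else b :: pvScatterA ((ys.filter (fun v => v != 0)).reverse ++ [a]) [] (0 + pvCnt ys)
      from rfl]
    rw [if_pos hb]
    rw [List.getD_append_right _ _ _ _ (by simp [pvCnt])]
    simp [pvCnt, pvScatterA]
  rw [h1, h2]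
  simp

lemma flipped_eq_mid (xs : List Int) : flipped xs = pvMid xs := by
  have H : ∀ (n : Nat) (ys : List Int), ys.length ≤ n → flipped ys = pvMid ys := by
    intro n
    induction n with
    | zero =>
      intro ys h
      cases ys with
      | nil => rw [flipped_nil, pvMid_nil]
      | cons x l => simp at h
    | succ n ih =>
      intro ys h
      cases ys with
      | nil => rw [flipped_nil, pvMid_nil]
      | cons x xs' =>
        by_cases hx' : xs' = []
        · subst hx'; rw [flipped_single, pvMid_single]
        · have hsplit : xs'.dropLast ++ [xs'.getLast hx'] = xs' := List.dropLast_append_getLast hx'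
          have hlenxs' : xs'.length ≤ n := by simp [List.length_cons] at h; omega
          have hlend : xs'.dropLast.length + 1 = xs'.length := by
            cases xs' with
            | nil => exact absurd rfl hx'
            | cons y ys => simp
          have hlendrop : xs'.dropLast.length ≤ n := by omega
          rw [pvMid_cons x xs' hx']
          by_cases hx : x = 0
          · subst hx
            rw [if_pos rfl, flipped_cons_zero, ih xs' hlenxs']
          · rw [if_neg hx]
            by_cases hb : xs'.getLast hx' = 0
            · rw [if_pos hb]
              have hrw : x :: xs' = (x :: xs'.dropLast) ++ [(0 : Int)] := by
                rw [List.cons_append]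
                conv_lhs => rw [← hsplit]
                rw [hb]
              rw [hrw, flipped_append_zero, ih (x :: xs'.dropLast) (by simp; omega)]
            · rw [if_neg hb]
              have hrw : x :: xs' = x :: xs'.dropLast ++ [xs'.getLast hx'] := by
                rw [List.cons_append]
                conv_lhs => rw [← hsplit]
              rw [hrw, flipped_sandwich x (xs'.getLast hx') xs'.dropLast hx hb,
                ih xs'.dropLast hlendrop]
  exact H xs.length xs le_rfl

lemma pvMid_cons_zero (xs : List Int) : pvMid (0 :: xs) = 0 :: pvMid xs := by
  rw [← flipped_eq_mid, ← flipped_eq_mid, flipped_cons_zero]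

lemma pvMid_append_zero (xs : List Int) : pvMid (xs ++ [0]) = pvMid xs ++ [0] := by
  rw [← flipped_eq_mid, ← flipped_eq_mid, flipped_append_zero]

lemma pvMid_sandwich (a b : Int) (ys : List Int) (ha : a ≠ 0) (hb : b ≠ 0) :
    pvMid (a :: ys ++ [b]) = b :: pvMid ys ++ [a] := by
  rw [← flipped_eq_mid, ← flipped_eq_mid, flipped_sandwich a b ys ha hb]

lemma pv_set_at (P R : List Int) (x y : Int) : (P ++ x :: R).set P.length y = P ++ y :: R := by
  induction P with
  | nil => rfl
  | cons p P ih => simp [ih]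

lemma pv_getD_at (P R : List Int) (x d : Int) : (P ++ x :: R).getD P.length d = x := by
  rw [List.getD_append_right _ _ _ _ (le_refl _)]
  simp

lemma pvLoopB_stop (out : List Int) (i j : Nat) (h : ¬ i < j) : pvLoopB out i j = out := by
  rw [pvLoopB, if_neg h]

lemma pvLoopB_decomp : ∀ (n : Nat) (P M S : List Int), M.length ≤ n →
    pvLoopB (P ++ (M ++ S)) P.length (P.length + M.length - 1) = P ++ (pvMid M ++ S) := by
  intro n
  induction n with
  | zero =>
    intro P M S h
    cases M with
    | nil =>
      rw [pvLoopB_stop _ _ _ (by simp only [List.length_nil]; omega)]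
      rw [pvMid_nil]
    | cons a l => simp at h
  | succ n ih =>
    intro P M S h
    match M with
    | [] =>
      rw [pvLoopB_stop _ _ _ (by simp only [List.length_nil]; omega)]
      rw [pvMid_nil]
    | [x] =>
      rw [pvLoopB_stop _ _ _ (by simp only [List.length_cons, List.length_nil]; omega)]
      rw [pvMid_single]
    | A0 :: B1 :: M2 =>
      obtain ⟨Mi, B0, hsplit⟩ : ∃ Mi B0, (B1 :: M2) = Mi ++ [B0] :=
        ⟨(B1 :: M2).dropLast, (B1 :: M2).getLast (by simp),
          (List.dropLast_append_getLast (by simp : (B1 :: M2) ≠ [])).symm⟩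
      rw [hsplit] at h ⊢
      have h' : Mi.length ≤ n := by simp at h; omega
      -- normalize the list and indices
      have hout : P ++ ((A0 :: (Mi ++ [B0])) ++ S) = P ++ (A0 :: (Mi ++ (B0 :: S))) := by simp
      have hj : P.length + (A0 :: (Mi ++ [B0])).length - 1 = P.length + Mi.length + 1 := by
        simp; omega
      rw [hout, hj]
      have hij : P.length < P.length + Mi.length + 1 := by omega
      rw [pvLoopB, if_pos hij]
      have hgi : (P ++ (A0 :: (Mi ++ (B0 :: S)))).getD P.length 0 = A0 := pv_getD_at _ _ _ _
      have hgj : (P ++ (A0 :: (Mi ++ (B0 :: S)))).getD (P.length + Mi.length + 1) 0 = B0 := by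
        have e : P ++ (A0 :: (Mi ++ (B0 :: S))) = (P ++ A0 :: Mi) ++ (B0 :: S) := by simp
        have e2 : P.length + Mi.length + 1 = (P ++ A0 :: Mi).length := by simp; omega
        rw [e, e2, pv_getD_at]
      rw [hgi, hgj]
      by_cases hA : A0 = 0
      · rw [if_pos (by simp [hA])]
        have e3 : P ++ (A0 :: (Mi ++ (B0 :: S))) = (P ++ [A0]) ++ ((Mi ++ [B0]) ++ S) := by simp
        have e1 : P.length + 1 = (P ++ [A0]).length := by simp
        have e2 : P.length + Mi.length + 1 = (P ++ [A0]).length + (Mi ++ [B0]).length - 1 := by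
          simp; omega
        rw [e3, e1, e2, ih (P ++ [A0]) (Mi ++ [B0]) S (by simp; omega)]
        subst hA
        rw [show (0 : Int) :: (Mi ++ [B0]) = (0 : Int) :: (Mi ++ [B0]) from rfl,
          pvMid_cons_zero (Mi ++ [B0])]
        simp
      · rw [if_neg (by simp [hA])]
        by_cases hB : B0 = 0
        · rw [if_pos (by simp [hB])]
          have e3 : P ++ (A0 :: (Mi ++ (B0 :: S))) = P ++ ((A0 :: Mi) ++ (B0 :: S)) := by simp
          have e2 : P.length + Mi.length + 1 - 1 = P.length + (A0 :: Mi).length - 1 := by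
            simp
          rw [e3, e2, ih P (A0 :: Mi) (B0 :: S) (by simp; omega)]
          have hm : pvMid (A0 :: (Mi ++ [B0])) = pvMid (A0 :: Mi) ++ [0] := by
            rw [hB, show A0 :: (Mi ++ [(0 : Int)]) = (A0 :: Mi) ++ [(0 : Int)] by simp,
              pvMid_append_zero]
          rw [hm, hB]
          simp
        · rw [if_neg (by simp [hB])]
          have eset : ((P ++ (A0 :: (Mi ++ (B0 :: S)))).set P.length B0).set
              (P.length + Mi.length + 1) A0 = (P ++ [B0]) ++ (Mi ++ (A0 :: S)) := by
            rw [pv_set_at]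
            have e1 : P ++ B0 :: (Mi ++ (B0 :: S)) = (P ++ B0 :: Mi) ++ (B0 :: S) := by simp
            have e2 : P.length + Mi.length + 1 = (P ++ B0 :: Mi).length := by simp; omega
            rw [e1, e2, pv_set_at]
            simp
          rw [eset]
          have e1 : P.length + 1 = (P ++ [B0]).length := by simp
          have e2 : P.length + Mi.length + 1 - 1 = (P ++ [B0]).length + Mi.length - 1 := by
            simp
          rw [e1, e2, ih (P ++ [B0]) Mi (A0 :: S) h']
          have hm : pvMid (A0 :: (Mi ++ [B0])) = B0 :: pvMid Mi ++ [A0] :=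
            pvMid_sandwich A0 B0 Mi hA hB
          rw [hm]
          simp

lemma flipped_alt_eq_mid (xs : List Int) : flipped_alt xs = pvMid xs := by
  have h := pvLoopB_decomp xs.length [] xs [] le_rfl
  simpa [flipped_alt] using h

-- ===== VERDICT (by name: the statement is the Claim_ definition above) =====
theorem flipped_spec : Claim_equal_flipped := by
  intro xs _
  unfold Spec_flipped
  rw [flipped_eq_mid, flipped_alt_eq_mid]
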